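-- pv_equiv track=rewrite | github.com/Chung-I/tsm | tsm/tsm_g2p.py | get_character_level_sandhi_start_and_ends
-- ===== SOURCE A (Python) =====
-- from typing import List, Dict, Tuple
--
-- def word_lengths_to_char_start_and_ends(word_lengths: List[int]) -> List[Tuple[int, int]]:
--     start = 0
--     end = 0
--     start_and_ends = []
--     for word_len in word_lengths:
--         end += word_len
--         start_and_ends.append((start, end))
--         start = end
--     return start_and_ends
--
-- def phrase_boundary_to_start_and_ends(boundaries: List[bool]) -> List[Tuple[int, int]]:
--     """
--         [False, False, True, False, True] -> [(0, 3), (3, 5)]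
--     """
--     start = 0
--     start_and_ends = []
--     for idx in range(len(boundaries)):
--         if boundaries[idx]:
--             start_and_ends.append((start, idx+1))
--             start = idx+1
--     return start_and_ends
--
-- def get_character_level_sandhi_start_and_ends(words, word_sandhi_boundaries) -> List[Tuple[int, int]]:
--     """
--     """
--     char_sandhi_start_and_ends = []
--     char_start_and_ends = word_lengths_to_char_start_and_ends(map(len, words))
--     for start, end in phrase_boundary_to_start_and_ends(word_sandhi_boundaries):
--         char_start = char_start_and_ends[start][0]
--         char_end = char_start_and_ends[end-1][1]
--         char_sandhi_start_and_ends.append((char_start, char_end))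
--     return char_sandhi_start_and_ends
-- ===== SOURCE B (Python) =====
-- def get_character_level_sandhi_start_and_ends(words, word_sandhi_boundaries):
--     # single pass over prefix-sum character end positions
--     char_ends = []
--     total = 0
--     for w in words:
--         total += len(w)
--         char_ends.append(total)
--     spans = []
--     start_char = 0
--     for idx, is_boundary in enumerate(word_sandhi_boundaries):
--         if is_boundary:
--             end_char = char_ends[idx]
--             spans.append((start_char, end_char))
--             start_char = end_char
--     return spans
-- ===== Notes on version B (the rewrite author's own statement) =====
-- stated objective: simpler
-- what changed: Collapsed A's three helpers (per-word (start,end) span list, word-index phrase span list, lookup loop) into one pass over a prefix-sum array of character end positions, carrying the current phrase's start character directly.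
import Mathlib
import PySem

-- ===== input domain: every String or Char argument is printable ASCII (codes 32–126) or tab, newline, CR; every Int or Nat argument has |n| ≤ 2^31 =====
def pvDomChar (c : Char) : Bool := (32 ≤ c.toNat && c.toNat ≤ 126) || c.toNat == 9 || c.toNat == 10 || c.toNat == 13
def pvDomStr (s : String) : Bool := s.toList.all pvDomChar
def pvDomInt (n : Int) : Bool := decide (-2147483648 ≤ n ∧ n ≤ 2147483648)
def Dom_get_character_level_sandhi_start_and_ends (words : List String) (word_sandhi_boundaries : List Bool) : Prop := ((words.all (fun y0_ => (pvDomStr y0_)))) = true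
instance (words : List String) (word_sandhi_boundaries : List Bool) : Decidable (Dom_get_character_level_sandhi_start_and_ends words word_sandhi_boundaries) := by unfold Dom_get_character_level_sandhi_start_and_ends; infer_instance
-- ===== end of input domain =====

-- B collapses A's three helpers into one pass over prefix-sum character end positions (objective: simpler).


-- ===== PORT A =====
def word_lengths_to_char_start_and_ends (word_lengths : List Int) : List (Int × Int) :=
  -- state = (start, end, start_and_ends)
  (word_lengths.foldl
    (fun (st : Int × Int × List (Int × Int)) wl =>
      let e := st.2.1 + wl
      (e, e, st.2.2 ++ [(st.1, e)]))
    (0, 0, [])).2.2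

def phrase_boundary_to_start_and_ends (boundaries : List Bool) : List (Int × Int) :=
  -- for idx in range(len(boundaries)): if boundaries[idx]: append (start, idx+1); start = idx+1
  ((PySem.List.pyRange 0 (PySem.List.len boundaries) 1).foldl
    (fun (st : Int × List (Int × Int)) idx =>
      if PySem.List.pyGetD boundaries idx false then (idx + 1, st.2 ++ [(st.1, idx + 1)]) else st)
    (0, [])).2

def get_character_level_sandhi_start_and_ends (words : List String) (word_sandhi_boundaries : List Bool) : List (Int × Int) :=
  let char_start_and_ends := word_lengths_to_char_start_and_ends (words.map PySem.Str.len)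
  -- char_start_and_ends[start][0] / [end-1][1]: in range whenever Pre_ holds (Python raises IndexError otherwise)
  (phrase_boundary_to_start_and_ends word_sandhi_boundaries).foldl
    (fun acc p =>
      let char_start := (PySem.List.pyGetD char_start_and_ends p.1 (0, 0)).1
      let char_end := (PySem.List.pyGetD char_start_and_ends (p.2 - 1) (0, 0)).2
      acc ++ [(char_start, char_end)]) []

-- ===== PORT B =====
def get_character_level_sandhi_start_and_ends_alt (words : List String) (word_sandhi_boundaries : List Bool) : List (Int × Int) :=
  let char_ends := (words.foldl
    (fun (st : Int × List Int) w =>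
      let t := st.1 + PySem.Str.len w
      (t, st.2 ++ [t]))
    (0, [])).2
  -- single pass: state = (start_char, spans); char_ends[idx] in range whenever Pre_ holds
  ((PySem.List.enumerate word_sandhi_boundaries 0).foldl
    (fun (st : Int × List (Int × Int)) p =>
      if p.2 then
        let e := PySem.List.pyGetD char_ends p.1 0
        (e, st.2 ++ [(st.1, e)])
      else st)
    (0, [])).2

-- ===== PRECONDITION & SPEC =====
-- Pre_ excludes exactly the inputs where A raises IndexError: a True boundary whose index is ≥ len(words)
-- (B raises IndexError there too).
def Pre_get_character_level_sandhi_start_and_ends (words : List String) (word_sandhi_boundaries : List Bool) : Prop :=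
  ∀ i ∈ List.range word_sandhi_boundaries.length, word_sandhi_boundaries.getD i false = true → i < words.length
instance (words : List String) (word_sandhi_boundaries : List Bool) : Decidable (Pre_get_character_level_sandhi_start_and_ends words word_sandhi_boundaries) := by unfold Pre_get_character_level_sandhi_start_and_ends; infer_instance

def pvWitness_get_character_level_sandhi_start_and_ends : List String × List Bool :=
  (["ab", "c", "de"], [false, true, true])

def Spec_get_character_level_sandhi_start_and_ends (words : List String) (word_sandhi_boundaries : List Bool) (out : List (Int × Int)) : Prop := out = get_character_level_sandhi_start_and_ends_alt words word_sandhi_boundaries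
instance (words : List String) (word_sandhi_boundaries : List Bool) (out : List (Int × Int)) : Decidable (Spec_get_character_level_sandhi_start_and_ends words word_sandhi_boundaries out) := by unfold Spec_get_character_level_sandhi_start_and_ends; infer_instance

-- ===== CLAIM (what is proved, stated in full; the proofs are below) =====
def Claim_equal_get_character_level_sandhi_start_and_ends : Prop := ∀ (words : List String) (word_sandhi_boundaries : List Bool), Dom_get_character_level_sandhi_start_and_ends words word_sandhi_boundaries → Pre_get_character_level_sandhi_start_and_ends words word_sandhi_boundaries → Spec_get_character_level_sandhi_start_and_ends words word_sandhi_boundaries (get_character_level_sandhi_start_and_ends words word_sandhi_boundaries)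

-- ===== LEMMAS AND PROOFS =====

-- prefix sum of word lengths: number of characters in the first k words
def pvPfx (lens : List Int) (k : Nat) : Int := ((lens.take k).sum)

-- abstract phrase recursion (A's phrase_boundary helper, structurally)
def pvTP : List Bool → Int → Int → List (Int × Int)
  | [], _, _ => []
  | b :: t, i, s => if b then (s, i + 1) :: pvTP t (i + 1) (i + 1) else pvTP t (i + 1) s

-- abstract single-pass recursion (B's main loop, structurally)
def pvTB (ends : List Int) : List Bool → Int → Int → List (Int × Int)
  | [], _, _ => []
  | b :: t, i, c =>
    if b then (c, PySem.List.pyGetD ends i 0) :: pvTB ends t (i + 1) (PySem.List.pyGetD ends i 0)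
    else pvTB ends t (i + 1) c

theorem pvWl2cse_general (lens : List Int) (c : Int) (acc : List (Int × Int)) :
    (lens.foldl
      (fun (st : Int × Int × List (Int × Int)) wl =>
        let e := st.2.1 + wl
        (e, e, st.2.2 ++ [(st.1, e)]))
      (c, c, acc)).2.2
    = acc ++ (List.range lens.length).map (fun i => (c + pvPfx lens i, c + pvPfx lens (i + 1))) := by
  induction lens generalizing c acc with
  | nil => simp [pvPfx]
  | cons wl t ih =>
    simp only [List.foldl_cons]
    rw [ih]
    simp only [List.length_cons, List.range_succ_eq_map]
    simp [pvPfx, List.map_map, Function.comp_def, add_assoc]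

theorem pvEnds_general (words : List String) (c : Int) (acc : List Int) :
    (words.foldl
      (fun (st : Int × List Int) w =>
        let t := st.1 + PySem.Str.len w
        (t, st.2 ++ [t]))
      (c, acc)).2
    = acc ++ (List.range words.length).map (fun i => c + pvPfx (words.map PySem.Str.len) (i + 1)) := by
  induction words generalizing c acc with
  | nil => simp
  | cons w t ih =>
    simp only [List.foldl_cons]
    rw [ih]
    simp only [List.length_cons, List.range_succ_eq_map]
    simp [pvPfx, List.map_map, Function.comp_def, add_assoc]

theorem pvTP_fold (bs : List Bool) (i s : Int) (acc : List (Int × Int)) :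
    ((PySem.List.enumerate bs i).foldl
      (fun (st : Int × List (Int × Int)) p =>
        if p.2 then (p.1 + 1, st.2 ++ [(st.1, p.1 + 1)]) else st)
      (s, acc)).2
    = acc ++ pvTP bs i s := by
  induction bs generalizing i s acc with
  | nil => simp [pvTP, PySem.List.enumerate_nil]
  | cons b t ih =>
    rw [PySem.List.enumerate_cons]
    simp only [List.foldl_cons, pvTP]
    by_cases hb : b
    · simp only [hb, if_true]
      rw [ih]
      simp
    · simp only [hb]
      rw [ih]
      simp

theorem pvTB_fold (ends : List Int) (bs : List Bool) (i c : Int) (acc : List (Int × Int)) :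
    ((PySem.List.enumerate bs i).foldl
      (fun (st : Int × List (Int × Int)) p =>
        if p.2 then
          let e := PySem.List.pyGetD ends p.1 0
          (e, st.2 ++ [(st.1, e)])
        else st)
      (c, acc)).2
    = acc ++ pvTB ends bs i c := by
  induction bs generalizing i c acc with
  | nil => simp [pvTB, PySem.List.enumerate_nil]
  | cons b t ih =>
    rw [PySem.List.enumerate_cons]
    simp only [List.foldl_cons, pvTB]
    by_cases hb : b
    · simp only [hb, if_true]
      rw [ih]
      simp
    · simp only [hb]
      rw [ih]
      simp

-- lookup facts
theorem pvCse_lookup (words : List String) (i : Int) (h0 : 0 ≤ i) (h1 : i < (words.length : Int)) :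
    PySem.List.pyGetD (word_lengths_to_char_start_and_ends (words.map PySem.Str.len)) i (0, 0)
    = (pvPfx (words.map PySem.Str.len) i.toNat, pvPfx (words.map PySem.Str.len) (i.toNat + 1)) := by
  unfold word_lengths_to_char_start_and_ends
  rw [pvWl2cse_general]
  simp only [List.nil_append]
  rw [PySem.List.pyGetD_eq_getElem _ (0, 0) h0 (by simpa using h1)]
  simp

theorem pvEnds_lookup (words : List String) (i : Int) (h0 : 0 ≤ i) (h1 : i < (words.length : Int)) :
    PySem.List.pyGetD
      ((words.foldl
        (fun (st : Int × List Int) w =>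
          let t := st.1 + PySem.Str.len w
          (t, st.2 ++ [t]))
        (0, [])).2) i 0
    = pvPfx (words.map PySem.Str.len) (i.toNat + 1) := by
  rw [pvEnds_general]
  simp only [List.nil_append]
  rw [PySem.List.pyGetD_eq_getElem _ 0 h0 (by simpa using h1)]
  simp

-- the core simulation: A's per-phrase lookups equal B's carried start_char
theorem pvMain (words : List String) (bs : List Bool) (i s : Int)
    (hs0 : 0 ≤ s) (hsi : s ≤ i)
    (hpre : ∀ k : Nat, k < bs.length → bs.getD k false = true → i + k < (words.length : Int)) :
    (pvTP bs i s).map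
      (fun p =>
        ((PySem.List.pyGetD (word_lengths_to_char_start_and_ends (words.map PySem.Str.len)) p.1 (0, 0)).1,
         (PySem.List.pyGetD (word_lengths_to_char_start_and_ends (words.map PySem.Str.len)) (p.2 - 1) (0, 0)).2))
    = pvTB ((words.foldl
        (fun (st : Int × List Int) w =>
          let t := st.1 + PySem.Str.len w
          (t, st.2 ++ [t]))
        (0, [])).2) bs i (pvPfx (words.map PySem.Str.len) s.toNat) := by
  induction bs generalizing i s with
  | nil => simp [pvTP, pvTB]
  | cons b t ih =>
    by_cases hb : b
    · have hiW : i < (words.length : Int) := by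
        have := hpre 0 (by simp) (by simp [hb]); simpa using this
      have hi0 : 0 ≤ i := le_trans hs0 hsi
      simp only [pvTP, pvTB, hb, if_true, List.map_cons]
      rw [pvCse_lookup words s hs0 (lt_of_le_of_lt hsi hiW)]
      have he : i + 1 - 1 = i := by ring
      rw [he, pvCse_lookup words i hi0 hiW]
      rw [pvEnds_lookup words i hi0 hiW]
      have ht : (i + 1).toNat = i.toNat + 1 := by omega
      have htail := ih (i + 1) (i + 1) (by omega) le_rfl
        (fun k hk hbk => by
          have := hpre (k + 1) (by simpa using hk) (by simpa using hbk)
          push_cast at this ⊢; omega)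
      rw [ht] at htail
      rw [htail]
    · simp only [pvTP, pvTB, hb]
      exact ih (i + 1) s hs0 (by omega)
        (fun k hk hbk => by
          have := hpre (k + 1) (by simpa using hk) (by simpa using hbk)
          push_cast at this ⊢; omega)

-- ===== VERDICT (by name: the statement is the Claim_ definition above) =====
theorem get_character_level_sandhi_start_and_ends_spec : Claim_equal_get_character_level_sandhi_start_and_ends := by
  intro words bs _hd hpre
  unfold Spec_get_character_level_sandhi_start_and_ends
  unfold get_character_level_sandhi_start_and_ends get_character_level_sandhi_start_and_ends_alt
    phrase_boundary_to_start_and_ends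
  -- B side: enumerate fold = pvTB
  rw [pvTB_fold]
  -- A side: the pyRange+pyGetD loop is the enumerate loop (enumerate_eq_map_pyRange), hence pvTP
  have hA := pvTP_fold bs 0 0 ([] : List (Int × Int))
  rw [PySem.List.enumerate_eq_map_pyRange bs false, List.foldl_map] at hA
  simp only [List.nil_append] at hA
  simp only [List.nil_append, hA]
  -- A's main loop is a map over the phrase list
  rw [PySem.List.foldl_append_singleton_eq_map]
  simp only [List.nil_append]
  -- and that map is exactly B's single pass (pvMain at i = s = 0)
  have hm := pvMain words bs 0 0 le_rfl le_rfl
    (fun k hk hbk => by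
      have := hpre k (List.mem_range.mpr hk) hbk
      omega)
  simpa [pvPfx] using hm
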